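-- pv_equiv track=rewrite | github.com/lavenderbonnet/LearningWithPython | LearningWithPython/Chapter14/duplicationBooks.py | find_unknown_merge_pattern
-- ===== SOURCE A (Python) =====
-- def find_unknown_merge_pattern(vocab, wds):
--     vocab.sort()
--     wds.sort()
--
--     result = []
--     pvocab = 0
--     pwds = 0
--
--     while True:
--         if pvocab >= len(vocab):
--             result.extend(wds[pwds:])
--             break
--         if pwds >= len(wds):
--             break
--         if vocab[pvocab] == wds[pwds]:
--             pwds += 1
--         elif vocab[pvocab] < wds[pwds]:
--             pvocab += 1
--         else:
--             result.append(wds[pwds])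
--             pwds += 1
--
--     return result
-- ===== SOURCE B (Python) =====
-- def find_unknown_merge_pattern(vocab, wds):
--     vocab.sort()
--     wds.sort()
--     known = set(vocab)
--     return [w for w in wds if w not in known]
-- ===== Notes on version B (the rewrite author's own statement) =====
-- stated objective: simpler
-- what changed: Replaces the hand-written two-pointer merge over the two sorted lists with a set of vocab words and a single filtering comprehension over the sorted wds.
import Mathlib
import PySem

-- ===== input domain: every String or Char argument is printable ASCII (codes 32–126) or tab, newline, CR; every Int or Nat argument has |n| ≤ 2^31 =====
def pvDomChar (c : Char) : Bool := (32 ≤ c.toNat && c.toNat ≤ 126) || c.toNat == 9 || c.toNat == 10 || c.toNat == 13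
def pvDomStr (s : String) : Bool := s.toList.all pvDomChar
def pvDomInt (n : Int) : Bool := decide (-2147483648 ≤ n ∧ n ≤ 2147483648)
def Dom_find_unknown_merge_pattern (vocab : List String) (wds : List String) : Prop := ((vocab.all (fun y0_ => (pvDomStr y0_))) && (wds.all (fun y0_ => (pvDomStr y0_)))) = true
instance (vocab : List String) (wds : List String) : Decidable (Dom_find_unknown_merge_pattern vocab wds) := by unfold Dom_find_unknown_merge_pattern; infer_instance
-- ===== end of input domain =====

-- B replaces A's two-pointer merge over the two sorted lists with a vocab set plus one
-- filtering pass over sorted wds (objective: simpler). Both A and B sort both argument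
-- lists in place in Python; the equivalence proved here is about the RETURN value.

-- ===== PORT A =====
-- the 'while True' loop of A, over its state (pvocab, pwds, result)
def pvLoopA (vocab wds : List String) (pv pw : Nat) (result : List String) : List String :=
  if _h1 : vocab.length ≤ pv then
    result ++ wds.drop pw       -- wds[pwds:] with 0 ≤ pwds : exactly List.drop
  else if _h2 : wds.length ≤ pw then
    result
  else if vocab.getD pv "" = wds.getD pw "" then
    pvLoopA vocab wds pv (pw + 1) result
  else if vocab.getD pv "" < wds.getD pw "" then
    pvLoopA vocab wds (pv + 1) pw result
  else
    pvLoopA vocab wds pv (pw + 1) (result ++ [wds.getD pw ""])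
termination_by (vocab.length - pv) + (wds.length - pw)
decreasing_by all_goals omega

def find_unknown_merge_pattern (vocab : List String) (wds : List String) : List String :=
  pvLoopA (PySem.List.sorted vocab (fun x => x) false) (PySem.List.sorted wds (fun x => x) false) 0 0 []

-- ===== PORT B =====
def find_unknown_merge_pattern_alt (vocab : List String) (wds : List String) : List String :=
  let sv := PySem.List.sorted vocab (fun x => x) false
  let sw := PySem.List.sorted wds (fun x => x) false
  let known := PySem.Set.ofList sv
  sw.filter (fun w => !(PySem.Set.contains known w))

-- ===== PRECONDITION & SPEC =====
def Spec_find_unknown_merge_pattern (vocab : List String) (wds : List String) (out : List String) : Prop := out = find_unknown_merge_pattern_alt vocab wds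
instance (vocab : List String) (wds : List String) (out : List String) : Decidable (Spec_find_unknown_merge_pattern vocab wds out) := by unfold Spec_find_unknown_merge_pattern; infer_instance

-- ===== CLAIM (what is proved, stated in full; the proofs are below) =====
def Claim_equal_find_unknown_merge_pattern : Prop := ∀ (vocab : List String) (wds : List String), Dom_find_unknown_merge_pattern vocab wds → Spec_find_unknown_merge_pattern vocab wds (find_unknown_merge_pattern vocab wds)

-- ===== LEMMAS AND PROOFS =====

-- structural version of A's merge loop, on the suffixes of the two lists
def pvMergeD : List String → List String → List String
  | [], ws => ws
  | _ :: _, [] => []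
  | v :: vs, w :: ws =>
    if v = w then pvMergeD (v :: vs) ws
    else if v < w then pvMergeD vs (w :: ws)
    else w :: pvMergeD (v :: vs) ws
termination_by vs ws => vs.length + ws.length

theorem pvMergeD_nil (ws : List String) : pvMergeD [] ws = ws := by
  simp [pvMergeD]

theorem pvMergeD_cons_nil (v : String) (vs : List String) : pvMergeD (v :: vs) [] = [] := by
  simp [pvMergeD]

theorem pvMergeD_cons_cons (v : String) (vs : List String) (w : String) (ws : List String) :
    pvMergeD (v :: vs) (w :: ws) =
      if v = w then pvMergeD (v :: vs) ws
      else if v < w then pvMergeD vs (w :: ws)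
      else w :: pvMergeD (v :: vs) ws := by
  rw [pvMergeD]

theorem pvLoopA_eq_mergeD (vocab wds : List String) (pv pw : Nat) (result : List String) :
    pvLoopA vocab wds pv pw result = result ++ pvMergeD (vocab.drop pv) (wds.drop pw) := by
  induction pv, pw, result using pvLoopA.induct vocab wds with
  | case1 pv pw result h1 =>
      rw [pvLoopA, dif_pos h1, List.drop_eq_nil_of_le h1, pvMergeD_nil]
  | case2 pv pw result h1 h2 =>
      have hv : pv < vocab.length := by omega
      have ev : vocab.drop pv = vocab[pv] :: vocab.drop (pv + 1) := (List.getElem_cons_drop hv).symm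
      rw [pvLoopA, dif_neg h1, dif_pos h2, List.drop_eq_nil_of_le h2, ev, pvMergeD_cons_nil,
        List.append_nil]
  | case3 pv pw result h1 h2 heq ih =>
      have hv : pv < vocab.length := by omega
      have hw : pw < wds.length := by omega
      have ev : vocab.drop pv = vocab[pv] :: vocab.drop (pv + 1) := (List.getElem_cons_drop hv).symm
      have ew : wds.drop pw = wds[pw] :: wds.drop (pw + 1) := (List.getElem_cons_drop hw).symm
      have gv : vocab.getD pv "" = vocab[pv] := List.getD_eq_getElem _ _ hv
      have gw : wds.getD pw "" = wds[pw] := List.getD_eq_getElem _ _ hw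
      have heq' : vocab[pv] = wds[pw] := by rw [← gv, ← gw]; exact heq
      rw [pvLoopA, dif_neg h1, dif_neg h2, if_pos heq, ih, ev, ew, pvMergeD_cons_cons,
        if_pos heq']
  | case4 pv pw result h1 h2 hne hlt ih =>
      have hv : pv < vocab.length := by omega
      have hw : pw < wds.length := by omega
      have ev : vocab.drop pv = vocab[pv] :: vocab.drop (pv + 1) := (List.getElem_cons_drop hv).symm
      have ew : wds.drop pw = wds[pw] :: wds.drop (pw + 1) := (List.getElem_cons_drop hw).symm
      have gv : vocab.getD pv "" = vocab[pv] := List.getD_eq_getElem _ _ hv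
      have gw : wds.getD pw "" = wds[pw] := List.getD_eq_getElem _ _ hw
      have hne' : ¬ vocab[pv] = wds[pw] := by rw [← gv, ← gw]; exact hne
      have hlt' : vocab[pv] < wds[pw] := by rw [← gv, ← gw]; exact hlt
      rw [pvLoopA, dif_neg h1, dif_neg h2, if_neg hne, if_pos hlt, ih, ev, ew, pvMergeD_cons_cons,
        if_neg hne', if_pos hlt']
  | case5 pv pw result h1 h2 hne hnlt ih =>
      have hv : pv < vocab.length := by omega
      have hw : pw < wds.length := by omega
      have ev : vocab.drop pv = vocab[pv] :: vocab.drop (pv + 1) := (List.getElem_cons_drop hv).symm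
      have ew : wds.drop pw = wds[pw] :: wds.drop (pw + 1) := (List.getElem_cons_drop hw).symm
      have gv : vocab.getD pv "" = vocab[pv] := List.getD_eq_getElem _ _ hv
      have gw : wds.getD pw "" = wds[pw] := List.getD_eq_getElem _ _ hw
      have hne' : ¬ vocab[pv] = wds[pw] := by rw [← gv, ← gw]; exact hne
      have hnlt' : ¬ vocab[pv] < wds[pw] := by rw [← gv, ← gw]; exact hnlt
      rw [pvLoopA, dif_neg h1, dif_neg h2, if_neg hne, if_neg hnlt, ih, ev, ew, gw,
        pvMergeD_cons_cons, if_neg hne', if_neg hnlt']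
      simp

-- on sorted inputs the merge loop computes exactly the membership filter
theorem pvMergeD_eq_filter (vs ws : List String)
    (hvs : vs.Pairwise (· ≤ ·)) (hws : ws.Pairwise (· ≤ ·)) :
    pvMergeD vs ws = ws.filter (fun w => !(vs.contains w)) := by
  induction vs, ws using pvMergeD.induct with
  | case1 ws => simp [pvMergeD_nil]
  | case2 v vs => simp [pvMergeD_cons_nil]
  | case3 vs w ws ih =>
      rw [pvMergeD_cons_cons, if_pos rfl, ih hvs (List.Pairwise.of_cons hws)]
      simp
  | case4 v vs w ws hne hlt ih =>
      rw [pvMergeD_cons_cons, if_neg hne, if_pos hlt, ih (List.Pairwise.of_cons hvs) hws]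
      apply List.filter_congr
      intro x hx
      have hwx : w ≤ x := by
        rcases List.mem_cons.mp hx with h | h
        · exact le_of_eq h.symm
        · exact (List.pairwise_cons.mp hws).1 x h
      have hvx : v ≠ x := fun h =>
        absurd (lt_of_lt_of_le hlt (h ▸ hwx)) (lt_irrefl v)
      simp [Ne.symm hvx]
  | case5 v vs w ws hne hnlt ih =>
      rw [pvMergeD_cons_cons, if_neg hne, if_neg hnlt,
        ih hvs (List.Pairwise.of_cons hws)]
      have hvw : w < v := lt_of_le_of_ne (le_of_not_gt hnlt) (fun h => hne h.symm)
      have hwnot : w ∉ v :: vs := by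
        intro hmem
        rcases List.mem_cons.mp hmem with h | h
        · exact hne h.symm
        · have hvle : v ≤ w := (List.pairwise_cons.mp hvs).1 w h
          exact absurd (lt_of_le_of_lt hvle hvw) (lt_irrefl v)
      simp only [List.mem_cons, not_or] at hwnot
      simp [hwnot.1, hwnot.2]

-- ===== VERDICT (by name: the statement is the Claim_ definition above) =====
theorem find_unknown_merge_pattern_spec : Claim_equal_find_unknown_merge_pattern := by
  intro vocab wds _
  unfold Spec_find_unknown_merge_pattern find_unknown_merge_pattern find_unknown_merge_pattern_alt
  rw [pvLoopA_eq_mergeD]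
  simp only [List.drop_zero, List.nil_append]
  rw [pvMergeD_eq_filter _ _ (PySem.List.sorted_pairwise ..) (PySem.List.sorted_pairwise ..)]
  apply List.filter_congr
  intro x _
  simp [PySem.Set.contains, PySem.Set.mem_ofList]
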